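-- pv_equiv track=rewrite | github.com/tariq-hasan/leetcode | coding_patterns/06-trees/10-trie-prefix-tree/medium_1268_search_suggestions_system.py | suggestedProductsBruteForce
-- ===== SOURCE A (Python) =====
-- from typing import List
--
-- def suggestedProductsBruteForce(products: List[str], searchWord: str) -> List[List[str]]:
--     """
--     Brute Force Solution (For Understanding)
--
--     For each prefix, scan all products to find matches.
--     Inefficient but demonstrates the core logic clearly.
--
--     Time Complexity: O(S * N * M) where S=searchWord, N=products, M=avg length
--     Space Complexity: O(1) extra space
--     """
--     result = []
--
--     for i in range(len(searchWord)):
--         prefix = searchWord[:i+1]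
--
--         # Find all products starting with prefix
--         matches = []
--         for product in products:
--             if product.startswith(prefix):
--                 matches.append(product)
--
--         # Sort and take first 3
--         matches.sort()
--         result.append(matches[:3])
--
--     return result
-- ===== SOURCE B (Python) =====
-- def suggestedProductsBruteForce(products, searchWord):
--     # Sort once, then per prefix binary-search the start of the matching block
--     # and take at most the first 3 matches (matches are contiguous in sorted order).
--     sp = sorted(products)
--     n = len(sp)
--     result = []
--     prefix = ""
--     for ch in searchWord:
--         prefix += ch
--         lo, hi = 0, n
--         while lo < hi:
--             mid = (lo + hi) // 2
--             if sp[mid] < prefix: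
--                 lo = mid + 1
--             else:
--                 hi = mid
--         row = []
--         j = lo
--         while j < n and j < lo + 3 and sp[j].startswith(prefix):
--             row.append(sp[j])
--             j += 1
--         result.append(row)
--     return result
-- ===== Notes on version B (the rewrite author's own statement) =====
-- stated objective: faster
-- what changed: Instead of filtering all products and re-sorting the matches for every prefix, B sorts the products once and, for each prefix, binary-searches the start of the contiguous matching block in the sorted list and takes at most its first 3 elements.
import Mathlib
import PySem

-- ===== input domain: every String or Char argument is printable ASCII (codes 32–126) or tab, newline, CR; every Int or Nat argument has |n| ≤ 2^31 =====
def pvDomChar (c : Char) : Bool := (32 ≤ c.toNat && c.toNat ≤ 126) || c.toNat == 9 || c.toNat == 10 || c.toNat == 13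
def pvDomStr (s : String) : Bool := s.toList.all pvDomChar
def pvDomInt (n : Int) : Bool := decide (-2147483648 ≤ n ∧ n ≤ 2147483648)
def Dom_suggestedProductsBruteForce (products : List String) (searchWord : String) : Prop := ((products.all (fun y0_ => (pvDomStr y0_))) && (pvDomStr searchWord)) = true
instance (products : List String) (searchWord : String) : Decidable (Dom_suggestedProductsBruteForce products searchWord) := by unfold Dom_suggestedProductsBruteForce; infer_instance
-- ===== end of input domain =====

-- B sorts the products once and per prefix binary-searches the start of the contiguous
-- matching block, taking at most its first 3 elements (objective: faster, asymptotic).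


-- ===== PORT A =====
def suggestedProductsBruteForce (products : List String) (searchWord : String) : List (List String) :=
  (PySem.List.pyRange 0 (PySem.Str.len searchWord) 1).foldl
    (fun result i =>
      let pfx := PySem.Str.slice searchWord none (some (i + 1))
      let ms := products.foldl
        (fun ms product =>
          if PySem.Str.startswith product pfx then ms ++ [product] else ms) []
      result ++ [PySem.List.slice (PySem.List.sorted ms (fun x => x)) none (some 3)]) []

-- ===== PORT B =====
-- the hand-written binary search of Source B (first index whose product is ≥ prefix)
def pvBisect (sp : List String) (pre : List Char) (lo hi : Nat) : Nat :=
  if lo < hi then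
    let mid := (lo + hi) / 2
    if (sp.getD mid "").toList < pre then pvBisect sp pre (mid + 1) hi
    else pvBisect sp pre lo mid
  else lo
termination_by hi - lo
decreasing_by all_goals omega

-- the row loop of Source B: collect consecutive matches from index j, stopping at stop or at the first non-match
def pvTake3 (sp : List String) (pre : List Char) (j stop : Nat) : List String :=
  if j < stop then
    let s := sp.getD j ""
    if PySem.Chars.startswith s.toList pre then s :: pvTake3 sp pre (j + 1) stop
    else []
  else []
termination_by stop - j

def suggestedProductsBruteForce_alt (products : List String) (searchWord : String) : List (List String) :=
  let sp := PySem.List.sorted products (fun x => x)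
  let n := sp.length
  (searchWord.toList.foldl
    (fun (st : List (List String) × List Char) ch =>
      let pre := st.2 ++ [ch]
      let lo := pvBisect sp pre 0 n
      (st.1 ++ [pvTake3 sp pre lo (min n (lo + 3))], pre))
    ([], [])).1

-- ===== PRECONDITION & SPEC =====
def Spec_suggestedProductsBruteForce (products : List String) (searchWord : String) (out : List (List String)) : Prop := out = suggestedProductsBruteForce_alt products searchWord
instance (products : List String) (searchWord : String) (out : List (List String)) : Decidable (Spec_suggestedProductsBruteForce products searchWord out) := by unfold Spec_suggestedProductsBruteForce; infer_instance

-- ===== CLAIM (what is proved, stated in full; the proofs are below) =====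
def Claim_equal_suggestedProductsBruteForce : Prop := ∀ (products : List String) (searchWord : String), Dom_suggestedProductsBruteForce products searchWord → Spec_suggestedProductsBruteForce products searchWord (suggestedProductsBruteForce products searchWord)

-- ===== LEMMAS AND PROOFS =====

-- the common row value: first 3 sorted matches of prefix p
def pvRow (products : List String) (p : List Char) : List String :=
  (PySem.List.sorted (products.filter (fun s => PySem.Chars.startswith s.toList p)) (fun x => x)).take 3

-- ---- generic lex facts ----
lemma pv_not_append_lt (s r : List Char) : ¬ (s ++ r) < s := by
  intro h
  induction s with
  | nil => exact List.not_lt_nil ([] : List Char) (by simp at h)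
  | cons c cs ih =>
      rw [List.cons_append, List.cons_lt_cons_iff] at h
      rcases h with h | ⟨_, h⟩
      · exact absurd h (lt_irrefl c)
      · exact ih h

lemma pv_not_lt_of_prefix {p s : List Char} (h : p <+: s) : ¬ s < p := by
  obtain ⟨r, rfl⟩ := h; exact pv_not_append_lt p r

-- between two strings with prefix p: ¬ s < p, ¬ t < s, p prefix of t ⟹ p prefix of s
lemma pv_prefix_between {p s t : List Char} (hps : ¬ s < p) (hst : ¬ t < s) (hpt : p <+: t) :
    p <+: s := by
  induction p generalizing s t with
  | nil => exact List.nil_prefix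
  | cons c p' ih =>
      obtain ⟨r, rfl⟩ := hpt
      cases s with
      | nil => exact absurd (List.nil_lt_cons _ _) hps
      | cons d s' =>
          rw [List.cons_append] at hst
          have h1 : ¬ d < c := fun h => hps (List.cons_lt_cons_iff.mpr (Or.inl h))
          have h2 : ¬ c < d := fun h => hst (List.cons_lt_cons_iff.mpr (Or.inl h))
          have hdc : d = c := le_antisymm (not_lt.mp h2) (not_lt.mp h1)
          subst hdc
          have hps' : ¬ s' < p' := fun h => hps (List.cons_lt_cons_iff.mpr (Or.inr ⟨rfl, h⟩))
          have hst' : ¬ (p' ++ r) < s' := fun h => hst (List.cons_lt_cons_iff.mpr (Or.inr ⟨rfl, h⟩))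
          exact List.cons_prefix_cons.mpr ⟨rfl, ih hps' hst' (List.prefix_append p' r)⟩

-- ---- stable insertion sort commutes with filter ----
lemma pv_insertBy_all_lt (bef : String → String → Bool) (x : String) (l : List String)
    (h : ∀ z ∈ l, bef x z = true) : PySem.List.insertBy bef x l = x :: l := by
  cases l with
  | nil => simp [PySem.List.insertBy]
  | cons y ys => simp [PySem.List.insertBy, h y (by simp)]

lemma pv_filter_insertBy_neg (q : String → Bool) (bef : String → String → Bool) (x : String)
    (ys : List String) (hx : q x = false) :
    (PySem.List.insertBy bef x ys).filter q = ys.filter q := by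
  induction ys with
  | nil => simp [PySem.List.insertBy, hx]
  | cons y ys ih =>
      by_cases hb : bef x y = true
      · simp [PySem.List.insertBy, hb, hx]
      · simp only [PySem.List.insertBy, hb, Bool.false_eq_true, if_false, List.filter_cons, ih]

lemma pv_filter_insertBy_pos (q : String → Bool) (x : String) (ys : List String)
    (hys : ys.Pairwise (· ≤ ·)) (hx : q x = true) :
    (PySem.List.insertBy (fun a b => decide (a < b)) x ys).filter q
      = PySem.List.insertBy (fun a b => decide (a < b)) x (ys.filter q) := by
  induction ys with
  | nil => simp [PySem.List.insertBy, hx]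
  | cons y ys ih =>
      have hy : ∀ z ∈ ys, y ≤ z := fun z hz => List.rel_of_pairwise_cons hys hz
      have htl := hys.of_cons
      by_cases hb : x < y
      · have hall : ∀ z ∈ (y :: ys).filter q, decide (x < z) = true := by
          intro z hz
          have hz' : z ∈ y :: ys := List.mem_of_mem_filter hz
          rcases List.mem_cons.mp hz' with rfl | hz''
          · simpa using hb
          · simpa using lt_of_lt_of_le hb (hy z hz'')
        rw [pv_insertBy_all_lt _ _ ((y :: ys).filter q) hall]
        simp [PySem.List.insertBy, hb, hx]
      · have h1 : PySem.List.insertBy (fun a b => decide (a < b)) x (y :: ys)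
            = y :: PySem.List.insertBy (fun a b => decide (a < b)) x ys := by
          simp [PySem.List.insertBy, hb]
        rw [h1, List.filter_cons]
        by_cases hq : q y = true
        · have h2 : PySem.List.insertBy (fun a b => decide (a < b)) x ((y :: ys).filter q)
              = y :: PySem.List.insertBy (fun a b => decide (a < b)) x (ys.filter q) := by
            rw [List.filter_cons, hq, if_pos rfl]
            simp [PySem.List.insertBy, hb]
          rw [h2, hq, if_pos rfl, ih htl]
        · rw [List.filter_cons]
          simp only [hq, Bool.false_eq_true, if_false]
          exact ih htl

lemma pv_insertBy_pairwise (x : String) (ys : List String) (h : ys.Pairwise (· ≤ ·)) :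
    (PySem.List.insertBy (fun a b => decide (a < b)) x ys).Pairwise (· ≤ ·) := by
  induction ys with
  | nil => simp [PySem.List.insertBy]
  | cons y ys ih =>
      have hy : ∀ z ∈ ys, y ≤ z := fun z hz => List.rel_of_pairwise_cons h hz
      have htl := h.of_cons
      by_cases hb : x < y
      · simp only [PySem.List.insertBy, decide_eq_true_eq, hb, if_true]
        refine List.Pairwise.cons ?_ h
        intro z hz
        rcases List.mem_cons.mp hz with rfl | hz'
        · exact le_of_lt hb
        · exact le_of_lt (lt_of_lt_of_le hb (hy z hz'))
      · simp only [PySem.List.insertBy, decide_eq_true_eq, hb, if_false]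
        refine List.Pairwise.cons ?_ (ih htl)
        intro z hz
        rcases (PySem.List.mem_insertBy _ _ _ _).mp hz with rfl | hz'
        · exact not_lt.mp hb
        · exact hy z hz'

lemma pv_foldl_ins_filter (q : String → Bool) (xs : List String) :
    ∀ acc : List String, acc.Pairwise (· ≤ ·) →
    (xs.foldl (fun acc x => PySem.List.insertBy (fun a b => decide (a < b)) x acc) acc).filter q
      = (xs.filter q).foldl (fun acc x => PySem.List.insertBy (fun a b => decide (a < b)) x acc) (acc.filter q) := by
  induction xs with
  | nil => intro acc _; simp
  | cons x xs ih =>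
      intro acc hacc
      rw [List.foldl_cons, ih _ (pv_insertBy_pairwise x acc hacc), List.filter_cons]
      by_cases hq : q x = true
      · rw [pv_filter_insertBy_pos q x acc hacc hq, hq, if_pos rfl, List.foldl_cons]
      · rw [pv_filter_insertBy_neg q _ x acc (Bool.not_eq_true _ ▸ hq : q x = false)]
        simp [hq]

lemma pv_sorted_filter (q : String → Bool) (xs : List String) :
    PySem.List.sorted (xs.filter q) (fun x => x)
      = (PySem.List.sorted xs (fun x => x)).filter q := by
  rw [PySem.List.sorted_eq_foldl_insertBy, PySem.List.sorted_eq_foldl_insertBy]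
  have := pv_foldl_ins_filter q xs [] (by simp)
  simpa using this.symm

-- ---- order facts about the sorted list ----
lemma pv_getD_le (sp : List String) (hs : sp.Pairwise (· ≤ ·)) {i j : Nat}
    (hij : i ≤ j) (hj : j < sp.length) : sp.getD i "" ≤ sp.getD j "" := by
  have hi : i < sp.length := lt_of_le_of_lt hij hj
  rw [List.getD_eq_getElem sp "" hi, List.getD_eq_getElem sp "" hj]
  rcases lt_or_eq_of_le hij with h | h
  · exact List.pairwise_iff_getElem.mp hs i j hi hj h
  · subst h; exact le_refl _

lemma pv_lt_of_le_of_lt {a b : String} {pre : List Char}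
    (hab : a ≤ b) (hb : b.toList < pre) : a.toList < pre := by
  rcases lt_or_eq_of_le hab with h | h
  · exact List.lt_trans (String.lt_iff_toList_lt.mp h) hb
  · subst h; exact hb

lemma pv_not_lt_of_le_of_not_lt {a b : String} {pre : List Char}
    (hab : a ≤ b) (ha : ¬ a.toList < pre) : ¬ b.toList < pre := by
  intro hb
  rcases lt_or_eq_of_le hab with h | h
  · exact ha (List.lt_trans (String.lt_iff_toList_lt.mp h) hb)
  · subst h; exact ha hb

-- ---- binary-search invariant ----
lemma pv_bisect_spec (sp : List String) (pre : List Char) (hs : sp.Pairwise (· ≤ ·))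
    (lo hi : Nat) (hlo : lo ≤ hi) (hhi : hi ≤ sp.length)
    (h1 : ∀ j, j < lo → j < sp.length → (sp.getD j "").toList < pre)
    (h2 : ∀ j, hi ≤ j → j < sp.length → ¬ (sp.getD j "").toList < pre) :
    pvBisect sp pre lo hi ≤ sp.length ∧
    (∀ j, j < pvBisect sp pre lo hi → j < sp.length → (sp.getD j "").toList < pre) ∧
    (∀ j, pvBisect sp pre lo hi ≤ j → j < sp.length → ¬ (sp.getD j "").toList < pre) := by
  fun_induction pvBisect sp pre lo hi with
  | case1 lo hi hlh mid hmid ih =>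
      refine ih (by omega) hhi ?_ h2
      intro j hj hjlen
      rcases Nat.lt_or_ge j lo with h | h
      · exact h1 j h hjlen
      · have hmlen : mid < sp.length := by omega
        exact pv_lt_of_le_of_lt (pv_getD_le sp hs (by omega) hmlen) hmid
  | case2 lo hi hlh mid hmid ih =>
      refine ih (by omega) (by omega) h1 ?_
      intro j hj hjlen
      exact pv_not_lt_of_le_of_not_lt (pv_getD_le sp hs hj hjlen) hmid
  | case3 lo hi hlh =>
      have hlh' : lo = hi ∨ hi < lo := by omega
      exact ⟨by omega, fun j hj hjlen => h1 j (by omega) hjlen,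
             fun j hj hjlen => h2 j (by omega) hjlen⟩

-- ---- the row loop collects the first (stop - j) consecutive matches ----
lemma pv_take3_eq (sp : List String) (pre : List Char) (hs : sp.Pairwise (· ≤ ·)) :
    ∀ d j stop, stop - j ≤ d → stop ≤ sp.length →
    (∀ i, j ≤ i → i < sp.length → ¬ (sp.getD i "").toList < pre) →
    pvTake3 sp pre j stop
      = ((sp.drop j).filter (fun s => PySem.Chars.startswith s.toList pre)).take (stop - j) := by
  intro d
  induction d with
  | zero =>
      intro j stop hd _ _
      rw [pvTake3, if_neg (by omega : ¬ j < stop)]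
      have h0 : stop - j = 0 := by omega
      simp [h0]
  | succ d ih =>
      intro j stop hd hstop hge
      rw [pvTake3]
      by_cases hjs : j < stop
      · rw [if_pos hjs]
        have hjlen : j < sp.length := lt_of_lt_of_le hjs hstop
        have hgetD : sp.getD j "" = sp[j] := List.getD_eq_getElem sp "" hjlen
        rw [List.drop_eq_getElem_cons hjlen, List.filter_cons]
        by_cases hq : PySem.Chars.startswith (sp.getD j "").toList pre = true
        · rw [if_pos hq]
          have hq' : PySem.Chars.startswith sp[j].toList pre = true := by
            rw [← hgetD]; exact hq
          rw [if_pos hq']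
          have hsj : stop - j = (stop - (j + 1)) + 1 := by omega
          rw [hsj, List.take_succ_cons, ← hgetD]
          congr 1
          exact ih (j + 1) stop (by omega) hstop
            (fun i hi hilen => hge i (by omega) hilen)
        · rw [if_neg hq]
          have hfil : (sp.drop (j + 1)).filter (fun s => PySem.Chars.startswith s.toList pre) = [] := by
            rw [List.filter_eq_nil_iff]
            intro s hsmem
            obtain ⟨k, hk, hkeq⟩ := List.mem_iff_getElem.mp hsmem
            have hklen : j + 1 + k < sp.length := by
              have := hk; simp only [List.length_drop] at this; omega
            have hseq : s = sp.getD (j + 1 + k) "" := by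
              rw [List.getD_eq_getElem sp "" hklen, ← List.getElem_drop]
              exact hkeq.symm
            intro hqs
            have hple : pre <+: s.toList := (PySem.Chars.startswith_iff _ _).mp hqs
            have hle : sp.getD j "" ≤ sp.getD (j + 1 + k) "" := pv_getD_le sp hs (by omega) hklen
            have hnotlt : ¬ (sp.getD (j + 1 + k) "").toList < (sp.getD j "").toList := by
              have : ¬ sp.getD (j + 1 + k) "" < sp.getD j "" := Std.not_lt.mpr hle
              intro hcon
              exact this (String.lt_iff_toList_lt.mpr hcon)
            have hpj : pre <+: (sp.getD j "").toList :=
              pv_prefix_between (hge j (le_refl j) hjlen) hnotlt (hseq ▸ hple)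
            exact hq ((PySem.Chars.startswith_iff _ _).mpr hpj)
          have hqj : ¬ PySem.Chars.startswith sp[j].toList pre = true := by
            rw [← hgetD]; exact hq
          rw [if_neg hqj, hfil]
          simp
      · rw [if_neg hjs]
        have h0 : stop - j = 0 := by omega
        simp [h0]

-- ---- one row of B equals one row of A ----
lemma pv_rowB_eq (products : List String) (p : List Char) :
    pvTake3 (PySem.List.sorted products (fun x => x)) p
        (pvBisect (PySem.List.sorted products (fun x => x)) p 0 (PySem.List.sorted products (fun x => x)).length)
        (min (PySem.List.sorted products (fun x => x)).length
          (pvBisect (PySem.List.sorted products (fun x => x)) p 0 (PySem.List.sorted products (fun x => x)).length + 3))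
      = pvRow products p := by
  set sp := PySem.List.sorted products (fun x => x) with hsp
  have hs : sp.Pairwise (· ≤ ·) := PySem.List.sorted_pairwise products (fun x => x)
  set q : String → Bool := fun s => PySem.Chars.startswith s.toList p with hq
  set lo := pvBisect sp p 0 sp.length with hlo
  obtain ⟨hrlen, hlt, hge⟩ := pv_bisect_spec sp p hs 0 sp.length (Nat.zero_le _) (le_refl _)
    (fun j hj _ => absurd hj (Nat.not_lt_zero j)) (fun j hj hjlen => absurd hjlen (by omega))
  have htake := pv_take3_eq sp p hs (min sp.length (lo + 3) - lo) lo (min sp.length (lo + 3))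
    (le_refl _) (Nat.min_le_left _ _) (fun i hi hilen => hge i hi hilen)
  rw [htake]
  have hfsplit : sp.filter q = (sp.drop lo).filter q := by
    conv_lhs => rw [← List.take_append_drop lo sp]
    rw [List.filter_append]
    have : (sp.take lo).filter q = [] := by
      rw [List.filter_eq_nil_iff]
      intro s hsmem
      obtain ⟨k, hk, hkeq⟩ := List.mem_iff_getElem.mp hsmem
      have hklt : k < lo := by simp at hk; omega
      have hklen : k < sp.length := by simp at hk; omega
      have hseq : s = sp.getD k "" := by
        rw [List.getD_eq_getElem sp "" hklen, ← hkeq, List.getElem_take]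
      intro hqs
      exact pv_not_lt_of_prefix ((PySem.Chars.startswith_iff _ _).mp hqs)
        (by rw [hseq]; exact hlt k hklt hklen)
    rw [this, List.nil_append]
  have hrowA : pvRow products p = (sp.filter q).take 3 := by
    rw [pvRow, pv_sorted_filter q products, ← hsp]
  rw [hrowA, hfsplit]
  rcases Nat.lt_or_ge sp.length (lo + 3) with h | h
  · have h1 : min sp.length (lo + 3) - lo = sp.length - lo := by omega
    rw [h1]
    have hlen : ((sp.drop lo).filter q).length ≤ sp.length - lo := by
      calc ((sp.drop lo).filter q).length ≤ (sp.drop lo).length := List.length_filter_le _ _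
        _ = sp.length - lo := List.length_drop
    rw [List.take_of_length_le hlen, List.take_of_length_le (by omega)]
  · have h1 : min sp.length (lo + 3) - lo = 3 := by omega
    rw [h1]

-- ---- A as a map over prefix lengths ----
lemma pv_A_eq (products : List String) (w : String) :
    suggestedProductsBruteForce products w
      = (List.range w.toList.length).map (fun k => pvRow products (w.toList.take (k + 1))) := by
  rw [suggestedProductsBruteForce, PySem.Str.len_eq, PySem.List.pyRange_one]
  simp only [Int.sub_zero, Int.toNat_natCast, List.foldl_map]
  rw [PySem.List.foldl_append_singleton_eq_map]
  rw [List.nil_append]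
  apply List.map_congr_left
  intro k _
  have hcast : (0 + (k : Int)) + 1 = ((k + 1 : Nat) : Int) := by push_cast; ring
  rw [hcast]
  have hpfx : ∀ product : String,
      PySem.Str.startswith product (PySem.Str.slice w none (some ((k + 1 : Nat) : Int)))
        = PySem.Chars.startswith product.toList (w.toList.take (k + 1)) := by
    intro product
    rw [PySem.Str.startswith_eq, PySem.Str.toList_slice, PySem.Chars.slice_eq_listSlice,
      PySem.List.slice_to_natCast]
  simp only [hpfx]
  rw [PySem.List.foldl_append_if (fun product => PySem.Chars.startswith product.toList (w.toList.take (k + 1))) (fun x => x) products []]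
  rw [List.nil_append, List.map_id']
  rw [PySem.List.slice_to]
  · norm_num [pvRow]
    rfl
  · norm_num

-- ---- B as a map over prefix lengths ----
lemma pv_B_fold (sp : List String) (cs : List Char) :
    ∀ (res : List (List String)) (pre : List Char),
    (cs.foldl (fun (st : List (List String) × List Char) ch =>
        (st.1 ++ [pvTake3 sp (st.2 ++ [ch]) (pvBisect sp (st.2 ++ [ch]) 0 sp.length)
            (min sp.length (pvBisect sp (st.2 ++ [ch]) 0 sp.length + 3))], st.2 ++ [ch]))
      (res, pre)).1
      = res ++ (List.range cs.length).map (fun k =>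
          pvTake3 sp (pre ++ cs.take (k + 1)) (pvBisect sp (pre ++ cs.take (k + 1)) 0 sp.length)
            (min sp.length (pvBisect sp (pre ++ cs.take (k + 1)) 0 sp.length + 3))) := by
  induction cs with
  | nil => intro res pre; simp
  | cons c cs ih =>
      intro res pre
      rw [List.foldl_cons, ih]
      rw [List.length_cons, List.range_succ_eq_map, List.map_cons, List.map_map]
      simp [Function.comp_def, List.append_assoc]

lemma pv_B_eq (products : List String) (w : String) :
    suggestedProductsBruteForce_alt products w
      = (List.range w.toList.length).map (fun k =>
          pvTake3 (PySem.List.sorted products (fun x => x)) (w.toList.take (k + 1))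
            (pvBisect (PySem.List.sorted products (fun x => x)) (w.toList.take (k + 1)) 0
              (PySem.List.sorted products (fun x => x)).length)
            (min (PySem.List.sorted products (fun x => x)).length
              (pvBisect (PySem.List.sorted products (fun x => x)) (w.toList.take (k + 1)) 0
                (PySem.List.sorted products (fun x => x)).length + 3))) := by
  rw [suggestedProductsBruteForce_alt]
  rw [pv_B_fold (PySem.List.sorted products (fun x => x)) w.toList [] []]
  simp

theorem suggestedProductsBruteForce_spec : Claim_equal_suggestedProductsBruteForce := by
  intro products w _
  unfold Spec_suggestedProductsBruteForce
  rw [pv_A_eq, pv_B_eq]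
  apply List.map_congr_left
  intro k _
  exact (pv_rowB_eq products (w.toList.take (k + 1))).symm
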